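-- pv_equiv track=rewrite | github.com/Youni2017/4-Cyclic-Graph-Detector | WXML_FixedMatrixDetecter.py | mutate
-- ===== SOURCE A (Python) =====
-- def mutate(M, i):       # Mutation matrix (We perform the mutation process on matrix directly)
--     n = len(M)
--     M_ = [row[:] for row in M]
--     for j in range(n):
--         for k in range(n):
--             if j != k and M[j][i] > 0 and M[i][k] > 0:
--                 M_[j][k] += M[j][i] * M[i][k]
--                 M_[k][j] -= M[j][i] * M[i][k]
--     for j in range(n):
--         M_[j][i] *= -1
--         M_[i][j] *= -1
--     return M_
-- ===== SOURCE B (Python) =====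
-- def mutate(M, i):
--     # Gather-style rebuild: each entry of the result is a closed-form function of
--     # the original matrix only (no in-place updates).
--     n = len(M)
--     if i < 0:
--         i += n
--     def sgn(j):
--         return -1 if j == i else 1
--     return [[sgn(j) * sgn(k) * (M[j][k]
--                                 + max(M[j][i], 0) * max(M[i][k], 0)
--                                 - max(M[k][i], 0) * max(M[i][j], 0))
--              for k in range(n)]
--             for j in range(n)]
-- ===== Notes on version B (the rewrite author's own statement) =====
-- stated objective: simpler
-- what changed: A mutates a copied matrix in place with a double loop of conditional +=/-= updates followed by a sign-flip pass over row and column i; B rebuilds the matrix gather-style, computing every entry directly from the original matrix by one closed-form expression sgn(j)*sgn(k)*(M[j][k] + max(M[j][i],0)*max(M[i][k],0) - max(M[k][i],0)*max(M[i][j],0)).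
-- outside the precondition, e.g. on mutate([[0, -1], [5]], 0): A returns [[0, 1], [-5]], B raises IndexError
import Mathlib
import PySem

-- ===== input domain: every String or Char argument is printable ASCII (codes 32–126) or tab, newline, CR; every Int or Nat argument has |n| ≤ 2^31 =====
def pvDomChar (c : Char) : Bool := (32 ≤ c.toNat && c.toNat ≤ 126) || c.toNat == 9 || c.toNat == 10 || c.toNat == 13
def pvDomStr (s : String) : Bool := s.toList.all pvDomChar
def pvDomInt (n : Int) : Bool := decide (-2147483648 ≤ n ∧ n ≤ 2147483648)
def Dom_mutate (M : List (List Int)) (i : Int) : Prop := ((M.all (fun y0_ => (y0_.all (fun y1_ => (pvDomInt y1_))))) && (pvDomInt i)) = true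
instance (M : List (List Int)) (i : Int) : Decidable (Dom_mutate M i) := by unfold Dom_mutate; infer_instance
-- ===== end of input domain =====

-- Port A mutates a copied matrix in place (double loop of conditional updates, then a sign
-- pass); B rebuilds each entry from the original matrix by one closed-form expression (simpler).


-- shared Python-indexing helpers: M[j][k] read (default 0) and M[j][k] := v write
def pyGet2 (Mx : List (List Int)) (j k : Int) : Int :=
  PySem.List.pyGetD (PySem.List.pyGetD Mx j []) k 0

def pySet2 (Mx : List (List Int)) (j k : Int) (v : Int) : List (List Int) :=
  PySem.List.pySetD Mx j (PySem.List.pySetD (PySem.List.pyGetD Mx j []) k v)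

-- ===== PORT A =====
def mutate (M : List (List Int)) (i : Int) : List (List Int) :=
  let n : Int := M.length
  let M0 := M.map (fun row => row)                       -- M_ = [row[:] for row in M]
  let M1 := (PySem.List.pyRange 0 n 1).foldl (fun acc j =>
    (PySem.List.pyRange 0 n 1).foldl (fun acc k =>
      if j ≠ k ∧ 0 < pyGet2 M j i ∧ 0 < pyGet2 M i k then
        let acc1 := pySet2 acc j k (pyGet2 acc j k + pyGet2 M j i * pyGet2 M i k)
        pySet2 acc1 k j (pyGet2 acc1 k j - pyGet2 M j i * pyGet2 M i k)
      else acc) acc) M0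
  (PySem.List.pyRange 0 n 1).foldl (fun acc j =>
    let acc1 := pySet2 acc j i (pyGet2 acc j i * (-1))
    pySet2 acc1 i j (pyGet2 acc1 i j * (-1))) M1

-- ===== PORT B =====
def mutate_alt (M : List (List Int)) (i : Int) : List (List Int) :=
  let n : Int := M.length
  let i' := if i < 0 then i + n else i
  let sgn : Int → Int := fun j => if j = i' then -1 else 1
  (PySem.List.pyRange 0 n 1).map (fun j =>
    (PySem.List.pyRange 0 n 1).map (fun k =>
      sgn j * sgn k * (pyGet2 M j k
        + max (pyGet2 M j i') 0 * max (pyGet2 M i' k) 0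
        - max (pyGet2 M k i') 0 * max (pyGet2 M i' j) 0)))

-- ===== PRECONDITION & SPEC =====
-- Pre_ admits square matrices with a valid (possibly negative) Python index i, and the empty
-- matrix with any i; it excludes inputs where A raises IndexError and also some ragged
-- matrices on which A happens to return via boolean short-circuiting (see claim cites) —
-- matrix mutation is only meaningful on square matrices.
def Pre_mutate (M : List (List Int)) (i : Int) : Prop :=
  (∀ r ∈ M, r.length = M.length) ∧
  (M = [] ∨ (-(M.length : Int) ≤ i ∧ i < (M.length : Int)))

instance (M : List (List Int)) (i : Int) : Decidable (Pre_mutate M i) := by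
  unfold Pre_mutate; infer_instance

def pvWitness_mutate : List (List Int) × Int := ([[0, 1], [-1, 0]], 0)

def Spec_mutate (M : List (List Int)) (i : Int) (out : List (List Int)) : Prop := out = mutate_alt M i
instance (M : List (List Int)) (i : Int) (out : List (List Int)) : Decidable (Spec_mutate M i out) := by unfold Spec_mutate; infer_instance

-- ===== CLAIM (what is proved, stated in full; the proofs are below) =====
def Claim_equal_mutate : Prop := ∀ (M : List (List Int)) (i : Int), Dom_mutate M i → Pre_mutate M i → Spec_mutate M i (mutate M i)

-- ===== LEMMAS AND PROOFS =====

-- normalized (non-negative) form of a Python index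
def nmz (n : Nat) (x : Int) : Int := if x < 0 then x + n else x

-- well-formed n×n matrix
def wfM (n : Nat) (Mx : List (List Int)) : Prop :=
  Mx.length = n ∧ ∀ r ∈ Mx, r.length = n

lemma nmz_bounds (n : Nat) (x : Int) (h1 : -(n : Int) ≤ x) (h2 : x < n) :
    0 ≤ nmz n x ∧ nmz n x < n := by unfold nmz; split_ifs <;> omega

lemma pyIdx?_norm (n : Nat) (x : Int) (h1 : -(n : Int) ≤ x) (h2 : x < n) :
    PySem.List.pyIdx? n x = some (nmz n x).toNat := by
  unfold PySem.List.pyIdx? nmz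
  split_ifs <;> first | rfl | omega | (congr 1; omega)

lemma pyGetD_norm {α : Type} (xs : List α) (x : Int) (d : α)
    (h1 : -(xs.length : Int) ≤ x) (h2 : x < xs.length) :
    PySem.List.pyGetD xs x d = PySem.List.pyGetD xs (nmz xs.length x) d := by
  have hb := nmz_bounds xs.length x h1 h2
  have e3 : nmz xs.length (nmz xs.length x) = nmz xs.length x := by
    unfold nmz; split_ifs <;> omega
  unfold PySem.List.pyGetD PySem.List.pyGet?
  rw [pyIdx?_norm xs.length x h1 h2, pyIdx?_norm xs.length _ (by omega) hb.2, e3]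

lemma pySetD_norm {α : Type} (xs : List α) (x : Int) (v : α)
    (h1 : -(xs.length : Int) ≤ x) (h2 : x < xs.length) :
    PySem.List.pySetD xs x v = PySem.List.pySetD xs (nmz xs.length x) v := by
  have hb := nmz_bounds xs.length x h1 h2
  have e3 : nmz xs.length (nmz xs.length x) = nmz xs.length x := by
    unfold nmz; split_ifs <;> omega
  unfold PySem.List.pySetD PySem.List.pySet?
  rw [pyIdx?_norm xs.length x h1 h2, pyIdx?_norm xs.length _ (by omega) hb.2, e3]

lemma row_len {n : Nat} {Mx : List (List Int)} (hwf : wfM n Mx) {a : Int}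
    (ha : 0 ≤ a) (han : a < n) :
    (PySem.List.pyGetD Mx a []).length = n := by
  rw [PySem.List.pyGetD_eq_getElem Mx [] ha (by rw [hwf.1]; exact han)]
  exact hwf.2 _ (List.getElem_mem _)

lemma pyGet2_elem (Mx : List (List Int)) (a b : Nat) :
    pyGet2 Mx (a : Int) (b : Int) = (Mx.getD a []).getD b 0 := by
  simp [pyGet2]

lemma wfM_pySet2 {n : Nat} {Mx : List (List Int)} (hwf : wfM n Mx) {j k : Int}
    (hj : 0 ≤ j) (hjn : j < n) (hk : 0 ≤ k) (hkn : k < n) (v : Int) :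
    wfM n (pySet2 Mx j k v) := by
  unfold pySet2
  rw [PySem.List.pySetD_of_nonneg Mx _ hj]
  refine ⟨by simpa using hwf.1, ?_⟩
  intro r hr
  rcases List.mem_or_eq_of_mem_set hr with h | h
  · exact hwf.2 _ h
  · subst h
    rw [PySem.List.pySetD_of_nonneg _ _ hk, List.length_set]
    exact row_len hwf hj hjn

lemma pyGet2_pySet2 {n : Nat} {Mx : List (List Int)} (hwf : wfM n Mx) {j k a b : Int}
    (hj : 0 ≤ j) (hjn : j < n) (hk : 0 ≤ k) (hkn : k < n)
    (ha : 0 ≤ a) (han : a < n) (hb : 0 ≤ b) (hbn : b < n) (v : Int) :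
    pyGet2 (pySet2 Mx j k v) a b = if a = j ∧ b = k then v else pyGet2 Mx a b := by
  have hL : Mx.length = n := hwf.1
  have hr : (PySem.List.pyGetD Mx j []).length = n := row_len hwf hj hjn
  unfold pyGet2 pySet2
  rw [PySem.List.pySetD_of_nonneg Mx _ hj, PySem.List.pySetD_of_nonneg _ _ hk]
  rw [PySem.List.pyGetD_eq_getElem _ [] ha (by rw [List.length_set, hL]; exact han)]
  rw [List.getElem_set]
  by_cases haj : a = j
  · rw [if_pos (show j.toNat = a.toNat by omega)]
    rw [PySem.List.pyGetD_eq_getElem _ 0 hb (by rw [List.length_set, hr]; exact hbn)]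
    rw [List.getElem_set]
    by_cases hbk : b = k
    · rw [if_pos (show k.toNat = b.toNat by omega), if_pos ⟨haj, hbk⟩]
    · rw [if_neg (show ¬ k.toNat = b.toNat by omega),
        if_neg (show ¬(a = j ∧ b = k) from fun h => hbk h.2)]
      rw [haj]
      rw [PySem.List.pyGetD_eq_getElem (PySem.List.pyGetD Mx j []) 0 hb
        (by rw [hr]; exact hbn)]
  · rw [if_neg (show ¬ j.toNat = a.toNat by omega),
      if_neg (show ¬(a = j ∧ b = k) from fun h => haj h.1)]
    rw [PySem.List.pyGetD_eq_getElem Mx [] ha (by rw [hL]; exact han)]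

-- read/write through a possibly negative second index, on a well-formed matrix
lemma pyGet2_normR {n : Nat} {Mx : List (List Int)} (hwf : wfM n Mx) {x i : Int}
    (hx : 0 ≤ x) (hxn : x < n) (hi1 : -(n : Int) ≤ i) (hi2 : i < n) :
    pyGet2 Mx x i = pyGet2 Mx x (nmz n i) := by
  have hr := row_len hwf hx hxn
  unfold pyGet2
  have h := pyGetD_norm (PySem.List.pyGetD Mx x []) i 0 (by rw [hr]; exact hi1)
    (by rw [hr]; exact hi2)
  rw [hr] at h
  exact h

lemma pyGet2_normL {n : Nat} {Mx : List (List Int)} (hwf : wfM n Mx) {i : Int} (y : Int)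
    (hi1 : -(n : Int) ≤ i) (hi2 : i < n) :
    pyGet2 Mx i y = pyGet2 Mx (nmz n i) y := by
  unfold pyGet2
  have h := pyGetD_norm Mx i ([] : List Int) (by rw [hwf.1]; exact hi1)
    (by rw [hwf.1]; exact hi2)
  rw [hwf.1] at h
  rw [h]

lemma pySet2_normR {n : Nat} {Mx : List (List Int)} (hwf : wfM n Mx) {x i : Int} (v : Int)
    (hx : 0 ≤ x) (hxn : x < n) (hi1 : -(n : Int) ≤ i) (hi2 : i < n) :
    pySet2 Mx x i v = pySet2 Mx x (nmz n i) v := by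
  have hr := row_len hwf hx hxn
  unfold pySet2
  have h := pySetD_norm (PySem.List.pyGetD Mx x []) i v (by rw [hr]; exact hi1)
    (by rw [hr]; exact hi2)
  rw [hr] at h
  rw [h]

lemma pySet2_normL {n : Nat} {Mx : List (List Int)} (hwf : wfM n Mx) {i : Int} (y v : Int)
    (hi1 : -(n : Int) ≤ i) (hi2 : i < n) :
    pySet2 Mx i y v = pySet2 Mx (nmz n i) y v := by
  unfold pySet2
  have h1 := pyGetD_norm Mx i ([] : List Int) (by rw [hwf.1]; exact hi1)
    (by rw [hwf.1]; exact hi2)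
  have h2 := pySetD_norm Mx i (PySem.List.pySetD (PySem.List.pyGetD Mx i []) y v)
    (by rw [hwf.1]; exact hi1) (by rw [hwf.1]; exact hi2)
  rw [hwf.1] at h1 h2
  rw [h2, h1]

-- sum/product of a map that is trivial off one element of a Nodup list
lemma sum_map_single (l : List Int) (F : Int → Int) (c : Int)
    (hnd : l.Nodup) (hc : c ∈ l) (h0 : ∀ x ∈ l, x ≠ c → F x = 0) :
    (l.map F).sum = F c := by
  induction l with
  | nil => simp at hc
  | cons x l ih =>
    rcases List.mem_cons.1 hc with h | h
    · subst h
      simp only [List.map_cons, List.sum_cons]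
      have hz : (l.map F).sum = 0 := by
        apply List.sum_eq_zero
        intro y hy
        rcases List.mem_map.1 hy with ⟨z, hz, rfl⟩
        exact h0 z (List.mem_cons_of_mem _ hz) (fun e => (List.nodup_cons.1 hnd).1 (e ▸ hz))
      simp [hz]
    · have hx : F x = 0 :=
        h0 x List.mem_cons_self (fun e => (List.nodup_cons.1 hnd).1 (e ▸ h))
      simp only [List.map_cons, List.sum_cons, hx, zero_add]
      exact ih (List.nodup_cons.1 hnd).2 h (fun y hy => h0 y (List.mem_cons_of_mem _ hy))

lemma prod_map_single (l : List Int) (F : Int → Int) (c : Int)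
    (hnd : l.Nodup) (hc : c ∈ l) (h1 : ∀ x ∈ l, x ≠ c → F x = 1) :
    (l.map F).prod = F c := by
  induction l with
  | nil => simp at hc
  | cons x l ih =>
    rcases List.mem_cons.1 hc with h | h
    · subst h
      simp only [List.map_cons, List.prod_cons]
      have hz : (l.map F).prod = 1 := by
        apply List.prod_eq_one
        intro y hy
        rcases List.mem_map.1 hy with ⟨z, hz, rfl⟩
        exact h1 z (List.mem_cons_of_mem _ hz) (fun e => (List.nodup_cons.1 hnd).1 (e ▸ hz))
      simp [hz]
    · have hx : F x = 1 :=
        h1 x List.mem_cons_self (fun e => (List.nodup_cons.1 hnd).1 (e ▸ h))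
      simp only [List.map_cons, List.prod_cons, hx, one_mul]
      exact ih (List.nodup_cons.1 hnd).2 h (fun y hy => h1 y (List.mem_cons_of_mem _ hy))

lemma sum_map_sub (l : List Int) (f g : Int → Int) :
    (l.map (fun x => f x - g x)).sum = (l.map f).sum - (l.map g).sum := by
  induction l with
  | nil => simp
  | cons x l ih => simp only [List.map_cons, List.sum_cons, ih]; ring

lemma max_mul_max (x y : Int) :
    max x 0 * max y 0 = if 0 < x ∧ 0 < y then x * y else 0 := by
  by_cases hx : x ≤ 0
  · rw [max_eq_right hx, zero_mul, if_neg (by omega)]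
  · by_cases hy : y ≤ 0
    · rw [max_eq_right hy, mul_zero, if_neg (by omega)]
    · rw [max_eq_left (by omega), max_eq_left (by omega), if_pos ⟨by omega, by omega⟩]

-- the bodies of A's two loops, named (let-free, but defeq to the port's lambdas)
def innerF (M : List (List Int)) (i j : Int) (acc : List (List Int)) (k : Int) :
    List (List Int) :=
  if j ≠ k ∧ 0 < pyGet2 M j i ∧ 0 < pyGet2 M i k then
    pySet2 (pySet2 acc j k (pyGet2 acc j k + pyGet2 M j i * pyGet2 M i k)) k j
      (pyGet2 (pySet2 acc j k (pyGet2 acc j k + pyGet2 M j i * pyGet2 M i k)) k j -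
        pyGet2 M j i * pyGet2 M i k)
  else acc

def negF (i : Int) (acc : List (List Int)) (j : Int) : List (List Int) :=
  pySet2 (pySet2 acc j i (pyGet2 acc j i * (-1))) i j
    (pyGet2 (pySet2 acc j i (pyGet2 acc j i * (-1))) i j * (-1))

-- per-entry effect of one inner-loop iteration
def dlt (M : List (List Int)) (i j k a b : Int) : Int :=
  (if (j ≠ k ∧ 0 < pyGet2 M j i ∧ 0 < pyGet2 M i k) ∧ a = j ∧ b = k then
      pyGet2 M j i * pyGet2 M i k else 0)
  - (if (j ≠ k ∧ 0 < pyGet2 M j i ∧ 0 < pyGet2 M i k) ∧ a = k ∧ b = j then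
      pyGet2 M j i * pyGet2 M i k else 0)

lemma mutate_eq (M : List (List Int)) (i : Int) :
    mutate M i =
      (PySem.List.pyRange 0 (M.length : Int) 1).foldl (negF i)
        ((PySem.List.pyRange 0 (M.length : Int) 1).foldl
          (fun acc j => (PySem.List.pyRange 0 (M.length : Int) 1).foldl (innerF M i j) acc)
          (M.map (fun row => row))) := rfl

lemma innerF_wf {n : Nat} (M : List (List Int)) (i : Int) {j k : Int}
    {acc : List (List Int)} (hwf : wfM n acc)
    (hj : 0 ≤ j ∧ j < n) (hk : 0 ≤ k ∧ k < n) :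
    wfM n (innerF M i j acc k) := by
  unfold innerF
  split_ifs with hC
  · exact wfM_pySet2 (wfM_pySet2 hwf hj.1 hj.2 hk.1 hk.2 _) hk.1 hk.2 hj.1 hj.2 _
  · exact hwf

lemma innerF_ent {n : Nat} (M : List (List Int)) (i : Int) {j k a b : Int}
    {acc : List (List Int)} (hwf : wfM n acc)
    (hj : 0 ≤ j ∧ j < n) (hk : 0 ≤ k ∧ k < n)
    (ha : 0 ≤ a ∧ a < n) (hb : 0 ≤ b ∧ b < n) :
    pyGet2 (innerF M i j acc k) a b = pyGet2 acc a b + dlt M i j k a b := by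
  by_cases hC : j ≠ k ∧ 0 < pyGet2 M j i ∧ 0 < pyGet2 M i k
  · unfold innerF dlt
    rw [if_pos hC]
    have hwf1 := wfM_pySet2 hwf hj.1 hj.2 hk.1 hk.2
      (pyGet2 acc j k + pyGet2 M j i * pyGet2 M i k)
    rw [pyGet2_pySet2 hwf1 hk.1 hk.2 hj.1 hj.2 ha.1 ha.2 hb.1 hb.2]
    rw [pyGet2_pySet2 hwf hj.1 hj.2 hk.1 hk.2 hk.1 hk.2 hj.1 hj.2]
    rw [if_neg (show ¬(k = j ∧ j = k) from fun h => hC.1 h.2)]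
    rw [pyGet2_pySet2 hwf hj.1 hj.2 hk.1 hk.2 ha.1 ha.2 hb.1 hb.2]
    by_cases h1 : a = k ∧ b = j
    · rw [if_pos h1,
        if_neg (show ¬((j ≠ k ∧ 0 < pyGet2 M j i ∧ 0 < pyGet2 M i k) ∧ a = j ∧ b = k) from by
          rintro ⟨_, e1, e2⟩; exact hC.1 (by omega)),
        if_pos ⟨hC, h1⟩, h1.1, h1.2]
      ring
    · rw [if_neg h1,
        if_neg (show ¬((j ≠ k ∧ 0 < pyGet2 M j i ∧ 0 < pyGet2 M i k) ∧ a = k ∧ b = j) from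
          fun h => h1 h.2)]
      by_cases h2 : a = j ∧ b = k
      · rw [if_pos h2, if_pos ⟨hC, h2⟩, h2.1, h2.2]
        ring
      · rw [if_neg h2,
          if_neg (show ¬((j ≠ k ∧ 0 < pyGet2 M j i ∧ 0 < pyGet2 M i k) ∧ a = j ∧ b = k) from
            fun h => h2 h.2)]
        ring
  · unfold innerF dlt
    rw [if_neg hC,
      if_neg (show ¬((j ≠ k ∧ 0 < pyGet2 M j i ∧ 0 < pyGet2 M i k) ∧ a = j ∧ b = k)
        from fun h => hC h.1),
      if_neg (show ¬((j ≠ k ∧ 0 < pyGet2 M j i ∧ 0 < pyGet2 M i k) ∧ a = k ∧ b = j)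
        from fun h => hC h.1)]
    ring

lemma foldl_innerF {n : Nat} (M : List (List Int)) (i : Int) {j : Int}
    (hj : 0 ≤ j ∧ j < n) (ks : List Int) :
    ∀ (acc : List (List Int)), wfM n acc → (∀ k ∈ ks, 0 ≤ k ∧ k < n) →
      wfM n (ks.foldl (innerF M i j) acc) ∧
      ∀ a b : Int, (0 ≤ a ∧ a < n) → (0 ≤ b ∧ b < n) →
        pyGet2 (ks.foldl (innerF M i j) acc) a b =
          pyGet2 acc a b + (ks.map (fun k => dlt M i j k a b)).sum := by
  induction ks with
  | nil => intro acc hwf _; exact ⟨hwf, by simp⟩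
  | cons k ks ih =>
    intro acc hwf hks
    have hk := hks k List.mem_cons_self
    have hwf' := innerF_wf (n := n) M i hwf hj hk
    obtain ⟨h1, h2⟩ := ih (innerF M i j acc k) hwf'
      (fun x hx => hks x (List.mem_cons_of_mem _ hx))
    refine ⟨h1, fun a b ha hb => ?_⟩
    simp only [List.foldl_cons, List.map_cons, List.sum_cons]
    rw [h2 a b ha hb, innerF_ent (n := n) M i hwf hj hk ha hb]
    ring

lemma foldl_outer {n : Nat} (M : List (List Int)) (i : Int) (js : List Int) :
    ∀ (acc : List (List Int)), wfM n acc → (∀ j ∈ js, 0 ≤ j ∧ j < n) →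
      wfM n (js.foldl
        (fun acc j => (PySem.List.pyRange 0 (n : Int) 1).foldl (innerF M i j) acc) acc) ∧
      ∀ a b : Int, (0 ≤ a ∧ a < n) → (0 ≤ b ∧ b < n) →
        pyGet2 (js.foldl
          (fun acc j => (PySem.List.pyRange 0 (n : Int) 1).foldl (innerF M i j) acc) acc) a b =
          pyGet2 acc a b +
            (js.map (fun j =>
              ((PySem.List.pyRange 0 (n : Int) 1).map (fun k => dlt M i j k a b)).sum)).sum := by
  induction js with
  | nil => intro acc hwf _; exact ⟨hwf, by simp⟩
  | cons j js ih =>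
    intro acc hwf hjs
    have hj := hjs j List.mem_cons_self
    have hmem : ∀ k ∈ PySem.List.pyRange 0 (n : Int) 1, 0 ≤ k ∧ k < n := by
      intro k hk
      have := PySem.List.mem_pyRange_one.1 hk
      omega
    obtain ⟨hw1, he1⟩ :=
      foldl_innerF (n := n) M i hj (PySem.List.pyRange 0 (n : Int) 1) acc hwf hmem
    obtain ⟨hw2, he2⟩ := ih _ hw1 (fun x hx => hjs x (List.mem_cons_of_mem _ hx))
    refine ⟨hw2, fun a b ha hb => ?_⟩
    simp only [List.foldl_cons, List.map_cons, List.sum_cons]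
    rw [he2 a b ha hb, he1 a b ha hb]
    ring

lemma negF_norm {n : Nat} {i j : Int} {acc : List (List Int)} (hwf : wfM n acc)
    (hj : 0 ≤ j ∧ j < n) (hi : -(n : Int) ≤ i ∧ i < n) :
    negF i acc j = negF (nmz n i) acc j := by
  have hI := nmz_bounds n i hi.1 hi.2
  unfold negF
  rw [pyGet2_normR hwf hj.1 hj.2 hi.1 hi.2, pySet2_normR hwf _ hj.1 hj.2 hi.1 hi.2]
  have hwf1 := wfM_pySet2 hwf hj.1 hj.2 hI.1 hI.2 (pyGet2 acc j (nmz n i) * (-1))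
  rw [pyGet2_normL hwf1 j hi.1 hi.2, pySet2_normL hwf1 j _ hi.1 hi.2]

lemma negF_wf {n : Nat} {i j : Int} {acc : List (List Int)} (hwf : wfM n acc)
    (hj : 0 ≤ j ∧ j < n) (hi : -(n : Int) ≤ i ∧ i < n) :
    wfM n (negF i acc j) := by
  have hI := nmz_bounds n i hi.1 hi.2
  rw [negF_norm hwf hj hi]
  unfold negF
  have hwf1 := wfM_pySet2 hwf hj.1 hj.2 hI.1 hI.2 (pyGet2 acc j (nmz n i) * (-1))
  exact wfM_pySet2 hwf1 hI.1 hI.2 hj.1 hj.2 _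

lemma negF_ent {n : Nat} {I j a b : Int} {acc : List (List Int)} (hwf : wfM n acc)
    (hI : 0 ≤ I ∧ I < n) (hj : 0 ≤ j ∧ j < n)
    (ha : 0 ≤ a ∧ a < n) (hb : 0 ≤ b ∧ b < n) :
    pyGet2 (negF I acc j) a b =
      (if ((a = j ∧ b = I) ∨ (a = I ∧ b = j)) ∧ ¬(a = I ∧ b = I) then (-1 : Int) else 1) *
        pyGet2 acc a b := by
  unfold negF
  have hwf1 := wfM_pySet2 hwf hj.1 hj.2 hI.1 hI.2 (pyGet2 acc j I * (-1))
  rw [pyGet2_pySet2 hwf1 hI.1 hI.2 hj.1 hj.2 ha.1 ha.2 hb.1 hb.2]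
  rw [pyGet2_pySet2 hwf hj.1 hj.2 hI.1 hI.2 hI.1 hI.2 hj.1 hj.2]
  rw [pyGet2_pySet2 hwf hj.1 hj.2 hI.1 hI.2 ha.1 ha.2 hb.1 hb.2]
  by_cases hIj : I = j
  · subst hIj
    rw [if_pos (show I = I ∧ I = I from ⟨rfl, rfl⟩)]
    by_cases hx : a = I ∧ b = I
    · rw [if_pos hx, if_neg (show ¬(((a = I ∧ b = I) ∨ (a = I ∧ b = I)) ∧ ¬(a = I ∧ b = I))
          from fun h => h.2 hx), hx.1, hx.2]
      ring
    · rw [if_neg hx, if_neg hx,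
        if_neg (show ¬(((a = I ∧ b = I) ∨ (a = I ∧ b = I)) ∧ ¬(a = I ∧ b = I)) from by tauto)]
      ring
  · rw [if_neg (show ¬(I = j ∧ j = I) from fun h => hIj h.1)]
    by_cases h1 : a = I ∧ b = j
    · rw [if_pos h1,
        if_pos (show ((a = j ∧ b = I) ∨ (a = I ∧ b = j)) ∧ ¬(a = I ∧ b = I) from
          ⟨Or.inr h1, fun h => hIj (by omega)⟩), h1.1, h1.2]
      ring
    · rw [if_neg h1]
      by_cases h2 : a = j ∧ b = I
      · rw [if_pos h2,
          if_pos (show ((a = j ∧ b = I) ∨ (a = I ∧ b = j)) ∧ ¬(a = I ∧ b = I) from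
            ⟨Or.inl h2, fun h => hIj (by omega)⟩), h2.1, h2.2]
        ring
      · rw [if_neg h2,
          if_neg (show ¬(((a = j ∧ b = I) ∨ (a = I ∧ b = j)) ∧ ¬(a = I ∧ b = I)) from by
            tauto)]
        ring

lemma foldl_negF {n : Nat} {i : Int} (hi : -(n : Int) ≤ i ∧ i < n) (js : List Int) :
    ∀ (acc : List (List Int)), wfM n acc → (∀ j ∈ js, 0 ≤ j ∧ j < n) →
      wfM n (js.foldl (negF i) acc) ∧
      ∀ a b : Int, (0 ≤ a ∧ a < n) → (0 ≤ b ∧ b < n) →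
        pyGet2 (js.foldl (negF i) acc) a b =
          (js.map (fun j =>
            if ((a = j ∧ b = nmz n i) ∨ (a = nmz n i ∧ b = j)) ∧
                ¬(a = nmz n i ∧ b = nmz n i) then (-1 : Int) else 1)).prod *
            pyGet2 acc a b := by
  have hI := nmz_bounds n i hi.1 hi.2
  induction js with
  | nil => intro acc hwf _; exact ⟨hwf, by simp⟩
  | cons j js ih =>
    intro acc hwf hjs
    have hj := hjs j List.mem_cons_self
    obtain ⟨h1, h2⟩ := ih (negF i acc j) (negF_wf hwf hj hi)
      (fun x hx => hjs x (List.mem_cons_of_mem _ hx))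
    refine ⟨h1, fun a b ha hb => ?_⟩
    simp only [List.foldl_cons, List.map_cons, List.prod_cons]
    rw [h2 a b ha hb, negF_norm hwf hj hi, negF_ent hwf hI hj ha hb]
    ring

-- evaluating the accumulated double sum at one entry
lemma sum_eval {n : Nat} (M : List (List Int)) (i : Int) {a b : Int}
    (ha : 0 ≤ a ∧ a < n) (hb : 0 ≤ b ∧ b < n) :
    ((PySem.List.pyRange 0 (n : Int) 1).map (fun j =>
        ((PySem.List.pyRange 0 (n : Int) 1).map (fun k => dlt M i j k a b)).sum)).sum =
      (if a ≠ b ∧ 0 < pyGet2 M a i ∧ 0 < pyGet2 M i b then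
        pyGet2 M a i * pyGet2 M i b else 0)
      - (if b ≠ a ∧ 0 < pyGet2 M b i ∧ 0 < pyGet2 M i a then
        pyGet2 M b i * pyGet2 M i a else 0) := by
  have hnd := PySem.List.nodup_pyRange_one 0 (n : Int)
  have hma : a ∈ PySem.List.pyRange 0 (n : Int) 1 :=
    PySem.List.mem_pyRange_one.2 ⟨ha.1, ha.2⟩
  have hmb : b ∈ PySem.List.pyRange 0 (n : Int) 1 :=
    PySem.List.mem_pyRange_one.2 ⟨hb.1, hb.2⟩
  have hinner : ∀ j : Int,
      ((PySem.List.pyRange 0 (n : Int) 1).map (fun k => dlt M i j k a b)).sum =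
        (if (j ≠ b ∧ 0 < pyGet2 M j i ∧ 0 < pyGet2 M i b) ∧ a = j then
          pyGet2 M j i * pyGet2 M i b else 0)
        - (if (j ≠ a ∧ 0 < pyGet2 M j i ∧ 0 < pyGet2 M i a) ∧ b = j then
          pyGet2 M j i * pyGet2 M i a else 0) := by
    intro j
    unfold dlt
    rw [sum_map_sub (PySem.List.pyRange 0 (n : Int) 1)
      (fun k => if (j ≠ k ∧ 0 < pyGet2 M j i ∧ 0 < pyGet2 M i k) ∧ a = j ∧ b = k then
        pyGet2 M j i * pyGet2 M i k else 0)
      (fun k => if (j ≠ k ∧ 0 < pyGet2 M j i ∧ 0 < pyGet2 M i k) ∧ a = k ∧ b = j then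
        pyGet2 M j i * pyGet2 M i k else 0)]
    rw [sum_map_single (PySem.List.pyRange 0 (n : Int) 1) _ b hnd hmb
      (fun x _ hxb => if_neg (fun h => hxb h.2.2.symm))]
    rw [sum_map_single (PySem.List.pyRange 0 (n : Int) 1) _ a hnd hma
      (fun x _ hxa => if_neg (fun h => hxa h.2.1.symm))]
    simp only [and_true, true_and]
  rw [List.map_eq_map_iff.mpr (fun j _ => hinner j)]
  rw [sum_map_sub (PySem.List.pyRange 0 (n : Int) 1)
    (fun j => if (j ≠ b ∧ 0 < pyGet2 M j i ∧ 0 < pyGet2 M i b) ∧ a = j then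
      pyGet2 M j i * pyGet2 M i b else 0)
    (fun j => if (j ≠ a ∧ 0 < pyGet2 M j i ∧ 0 < pyGet2 M i a) ∧ b = j then
      pyGet2 M j i * pyGet2 M i a else 0)]
  rw [sum_map_single (PySem.List.pyRange 0 (n : Int) 1) _ a hnd hma
    (fun x _ hxa => if_neg (fun h => hxa h.2.symm))]
  rw [sum_map_single (PySem.List.pyRange 0 (n : Int) 1) _ b hnd hmb
    (fun x _ hxb => if_neg (fun h => hxb h.2.symm))]
  simp only [and_true, true_and]

-- evaluating the accumulated sign product at one entry
lemma prod_eval {n : Nat} {I a b : Int} (hI : 0 ≤ I ∧ I < n)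
    (ha : 0 ≤ a ∧ a < n) (hb : 0 ≤ b ∧ b < n) :
    ((PySem.List.pyRange 0 (n : Int) 1).map (fun j =>
        if ((a = j ∧ b = I) ∨ (a = I ∧ b = j)) ∧ ¬(a = I ∧ b = I) then (-1 : Int) else 1)).prod
    = if a = I ∧ b = I then 1 else if a = I then -1 else if b = I then -1 else 1 := by
  have hnd := PySem.List.nodup_pyRange_one 0 (n : Int)
  have hma : a ∈ PySem.List.pyRange 0 (n : Int) 1 :=
    PySem.List.mem_pyRange_one.2 ⟨ha.1, ha.2⟩
  have hmb : b ∈ PySem.List.pyRange 0 (n : Int) 1 :=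
    PySem.List.mem_pyRange_one.2 ⟨hb.1, hb.2⟩
  by_cases hab : a = I ∧ b = I
  · rw [if_pos hab]
    apply List.prod_eq_one
    intro y hy
    rcases List.mem_map.1 hy with ⟨x, _, rfl⟩
    rw [if_neg (fun h => h.2 hab)]
  · rw [if_neg hab]
    by_cases haI : a = I
    · have hbI : ¬ b = I := fun h => hab ⟨haI, h⟩
      rw [if_pos haI]
      rw [prod_map_single (PySem.List.pyRange 0 (n : Int) 1) _ b hnd hmb
        (fun x _ hxb => if_neg (fun h => by
          rcases h.1 with ⟨_, e⟩ | ⟨_, e⟩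
          · exact hbI e
          · exact hxb e.symm))]
      rw [if_pos ⟨Or.inr ⟨haI, rfl⟩, fun h => hbI h.2⟩]
    · rw [if_neg haI]
      by_cases hbI : b = I
      · rw [if_pos hbI]
        rw [prod_map_single (PySem.List.pyRange 0 (n : Int) 1) _ a hnd hma
          (fun x _ hxa => if_neg (fun h => by
            rcases h.1 with ⟨e, _⟩ | ⟨e, _⟩
            · exact hxa e.symm
            · exact haI e))]
        rw [if_pos ⟨Or.inl ⟨rfl, hbI⟩, fun h => haI h.1⟩]
      · rw [if_neg hbI]
        apply List.prod_eq_one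
        intro y hy
        rcases List.mem_map.1 hy with ⟨x, _, rfl⟩
        rw [if_neg (fun h => by
          rcases h.1 with ⟨_, e⟩ | ⟨e, _⟩
          · exact hbI e
          · exact haI e)]

lemma elem_pyGet2 {n : Nat} {Mx : List (List Int)} (hwf : wfM n Mx) (u v : Nat)
    (h1 : u < Mx.length)
    (h2 : v < (Mx[u]'h1).length) :
    (Mx[u]'h1)[v]'h2 = pyGet2 Mx (u : Int) (v : Int) := by
  rw [pyGet2_elem]
  rw [List.getD_eq_getElem Mx [] h1, List.getD_eq_getElem _ 0 h2]

-- the two ports agree on every square matrix with a valid Python index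
set_option maxHeartbeats 2000000 in
lemma mutate_eq_mutate_alt (M : List (List Int)) (i : Int)
    (hsq : ∀ r ∈ M, r.length = M.length)
    (hi : -(M.length : Int) ≤ i ∧ i < (M.length : Int)) :
    mutate M i = mutate_alt M i := by
  have hwfM : wfM M.length M := ⟨rfl, hsq⟩
  have hIb := nmz_bounds M.length i hi.1 hi.2
  have hmem : ∀ j ∈ PySem.List.pyRange 0 (M.length : Int) 1,
      0 ≤ j ∧ j < (M.length : Int) := by
    intro j hj
    have := PySem.List.mem_pyRange_one.1 hj
    omega
  rw [mutate_eq, List.map_id']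
  obtain ⟨hwf1, he1⟩ :=
    foldl_outer (n := M.length) M i (PySem.List.pyRange 0 (M.length : Int) 1) M hwfM hmem
  obtain ⟨hwf2, he2⟩ :=
    foldl_negF (n := M.length) hi (PySem.List.pyRange 0 (M.length : Int) 1) _ hwf1 hmem
  apply List.ext_getElem
  · rw [hwf2.1]
    simp [mutate_alt, PySem.List.length_pyRange_one]
  · intro u hu1 hu2
    have hun : u < M.length := by rw [← hwf2.1]; exact hu1
    apply List.ext_getElem
    · rw [hwf2.2 _ (List.getElem_mem _)]
      simp [mutate_alt, PySem.List.length_pyRange_one, PySem.List.getElem_pyRange_one]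
    · intro v hv1 hv2
      have hvn : v < M.length := by
        rw [hwf2.2 _ (List.getElem_mem _)] at hv1
        exact hv1
      have hua : (0 : Int) ≤ (u : Int) ∧ (u : Int) < (M.length : Int) :=
        ⟨Int.natCast_nonneg u, by exact_mod_cast hun⟩
      have hva : (0 : Int) ≤ (v : Int) ∧ (v : Int) < (M.length : Int) :=
        ⟨Int.natCast_nonneg v, by exact_mod_cast hvn⟩
      rw [elem_pyGet2 hwf2 u v hu1 hv1]
      rw [he2 (u : Int) (v : Int) hua hva]
      rw [he1 (u : Int) (v : Int) hua hva]
      rw [sum_eval (n := M.length) M i hua hva]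
      rw [prod_eval (n := M.length) (I := nmz M.length i) hIb hua hva]
      rw [pyGet2_normR hwfM hua.1 hua.2 hi.1 hi.2]
      rw [pyGet2_normR hwfM hva.1 hva.2 hi.1 hi.2]
      rw [pyGet2_normL hwfM (v : Int) hi.1 hi.2]
      rw [pyGet2_normL hwfM (u : Int) hi.1 hi.2]
      simp only [mutate_alt, List.getElem_map, PySem.List.getElem_pyRange_one, zero_add]
      rw [show (if i < 0 then i + (M.length : Int) else i) = nmz M.length i from rfl]
      rw [max_mul_max, max_mul_max]
      clear he1 he2 hwf1 hwf2 hu1 hv1 hu2 hv2 hmem hwfM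
      by_cases hab : (u : Int) = (v : Int)
      · rw [hab]
        simp only [ne_eq, not_true, false_and, if_false]
        split_ifs <;> first | ring1 | tauto | omega
      · split_ifs <;> first | ring1 | tauto | omega

theorem mutate_spec : Claim_equal_mutate := by
  intro M i _ hPre
  unfold Spec_mutate
  rcases hPre.2 with hnil | hi
  · subst hnil
    rfl
  · exact mutate_eq_mutate_alt M i hPre.1 hi
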